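-- pv_equiv track=rewrite | github.com/AYEOOON/Algorithm | 프로그래머스/Python/1단계/[2025 프로그래머스 코드챌린지 1차 예선] - 유연근무제.py | solution
-- ===== SOURCE A (Python) =====
-- def solution(schedules, timelogs, startday):
--     answer = 0  # 상품을 받을 직원 수를 저장할 변수 초기화
--     weekdays = {1, 2, 3, 4, 5}  # 평일(월~금)을 나타내는 집합, 포함 여부 검사(in 연산) 목적이라면 set이 더 효율적이다.
--
--     # 모든 직원에 대해 반복
--     for i in range(len(timelogs)):
--         # 출근 희망 시각을 시(hour)와 분(minute)로 분리
--         hour = schedules[i] // 100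
--         minute = schedules[i] % 100 + 10  # 희망 시각 + 10분
--
--         # 분이 60 이상이면 시(hour)를 증가시키고 분을 조정
--         if minute >= 60:
--             hour += 1
--             minute -= 60
--
--         # 최종적으로 허용되는 출근 시각을 계산 (정수로 시*100 + 분)
--         allow_time = hour * 100 + minute
--
--         # 출근 요일을 시작 요일로 설정
--         day = startday
--         okay = 0  # 정시에 출근한 평일 수
--
--         # 7일 동안의 출근 기록 확인
--         for log in timelogs[i]:
--             # 현재 요일이 평일인 경우만 검사
--             if day % 7 in weekdays:
--                 # 출근 시간이 허용된 시간 이내면 인정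
--                 if log <= allow_time:
--                     okay += 1
--             day += 1  # 다음 날로 이동
--
--         # 평일 5일 모두 정시에 출근했으면 상품 대상
--         if okay == 5:
--             answer += 1
--
--     return answer  # 상품을 받을 직원 수 반환
-- ===== SOURCE B (Python) =====
-- def solution(schedules, timelogs, startday):
--     # Transposed traversal: precompute allowed times, then scan day-columns
--     # updating a per-employee counter array; finally tally counters equal to 5.
--     n = len(timelogs)
--     allow = []
--     for s in schedules[:n]:
--         t = s // 100 * 60 + s % 100 + 10
--         allow.append(t // 60 * 100 + t % 60)
--     counts = [0] * n
--     maxlen = max((len(r) for r in timelogs), default=0)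
--     for j in range(maxlen):
--         if (startday + j) % 7 in (1, 2, 3, 4, 5):
--             for i in range(n):
--                 row = timelogs[i]
--                 if j < len(row) and row[j] <= allow[i]:
--                     counts[i] += 1
--     return sum(1 for c in counts if c == 5)
-- ===== Notes on version B (the rewrite author's own statement) =====
-- stated objective: alternative
-- what changed: B transposes the traversal: it precomputes the allowed times (by a closed-form total-minutes conversion), then scans day-columns instead of employee rows, updating a per-employee counter array once per weekday column, and finally tallies counters equal to 5; A scans each employee's row with running day/okay accumulators.
import Mathlib
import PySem

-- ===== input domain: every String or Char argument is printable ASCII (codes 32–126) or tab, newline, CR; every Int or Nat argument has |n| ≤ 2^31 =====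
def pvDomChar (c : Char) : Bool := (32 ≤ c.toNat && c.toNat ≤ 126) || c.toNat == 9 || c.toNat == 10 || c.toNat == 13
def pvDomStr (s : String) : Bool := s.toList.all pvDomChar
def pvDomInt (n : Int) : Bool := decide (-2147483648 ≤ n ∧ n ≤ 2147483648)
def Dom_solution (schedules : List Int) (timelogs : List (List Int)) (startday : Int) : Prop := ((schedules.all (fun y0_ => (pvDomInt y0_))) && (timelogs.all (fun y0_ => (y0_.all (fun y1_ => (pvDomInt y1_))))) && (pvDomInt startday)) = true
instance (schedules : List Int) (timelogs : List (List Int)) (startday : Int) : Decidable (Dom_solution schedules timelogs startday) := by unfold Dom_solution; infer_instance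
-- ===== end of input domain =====

-- B transposes the traversal: it precomputes the allowed times, then scans
-- day-COLUMNS (not employee rows) updating a per-employee counter array once per
-- weekday column, and finally tallies the counters equal to 5 (objective: alternative).

-- ===== PORT A =====
-- the inner loop body of A: state (day, okay)
def stepA (allow_time : Int) (p : Int × Int) (log : Int) : Int × Int :=
  if PySem.Int.mod p.1 7 ∈ ([1, 2, 3, 4, 5] : List Int) then
    (p.1 + 1, if log ≤ allow_time then p.2 + 1 else p.2)
  else (p.1 + 1, p.2)

-- the body of A's outer loop, for one employee (s = schedules[i], row = timelogs[i])
def outerA (startday : Int) (answer : Int) (s : Int) (row : List Int) : Int :=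
  let hour := PySem.Int.floordiv s 100
  let minute := PySem.Int.mod s 100 + 10
  let hour2 := if 60 ≤ minute then hour + 1 else hour
  let minute2 := if 60 ≤ minute then minute - 60 else minute
  let allow_time := hour2 * 100 + minute2
  let st := row.foldl (stepA allow_time) (startday, 0)
  if st.2 = 5 then answer + 1 else answer

def solution (schedules : List Int) (timelogs : List (List Int)) (startday : Int) : Int :=
  (List.range timelogs.length).foldl (fun answer (i : Nat) =>
    -- schedules[i]: in range under Pre_solution (A raises IndexError otherwise);
    -- timelogs[i]: i < len(timelogs), always in range
    outerA startday answer (PySem.List.pyGetD schedules (i : Int) 0)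
      (PySem.List.pyGetD timelogs (i : Int) [])) 0

-- ===== PORT B =====
-- the body of Source B's allow-building loop: t = s//100*60 + s%100 + 10; t//60*100 + t%60
def allowOf (s : Int) : Int :=
  let t := PySem.Int.floordiv s 100 * 60 + PySem.Int.mod s 100 + 10
  PySem.Int.floordiv t 60 * 100 + PySem.Int.mod t 60

-- Source B's inner 'for i in range(n)' loop for one day-column j (row inlined)
def colStep (timelogs : List (List Int)) (allow : List Int) (j : Nat) (cs : List Int) : List Int :=
  (List.range timelogs.length).foldl (fun cs (i : Nat) =>
    if (j : Int) < ((PySem.List.pyGetD timelogs (i : Int) []).length : Int) ∧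
       PySem.List.pyGetD (PySem.List.pyGetD timelogs (i : Int) []) (j : Int) 0
         ≤ PySem.List.pyGetD allow (i : Int) 0
    then cs.set i (PySem.List.pyGetD cs (i : Int) 0 + 1) else cs) cs

def solution_alt (schedules : List Int) (timelogs : List (List Int)) (startday : Int) : Int :=
  let n := timelogs.length
  -- allow: for s in schedules[:n]: allow.append(...)
  let allow := (PySem.List.slice schedules none (some (n : Int))).foldl
    (fun acc s => acc ++ [allowOf s]) []
  -- maxlen = max of the row lengths with default 0 (lengths are ≥ 0, so folding from 0 is exact)
  let maxlen := timelogs.foldl (fun m r => max m r.length) 0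
  let counts := (List.range maxlen).foldl (fun cs (j : Nat) =>
    if PySem.Int.mod (startday + (j : Int)) 7 ∈ ([1, 2, 3, 4, 5] : List Int)
    then colStep timelogs allow j cs else cs) (List.replicate n (0 : Int))
  counts.foldl (fun a c => if c = 5 then a + 1 else a) 0

-- ===== PRECONDITION & SPEC =====
-- Pre_ excludes only inputs where A raises IndexError (schedules shorter than timelogs).
def Pre_solution (schedules : List Int) (timelogs : List (List Int)) (startday : Int) : Prop :=
  timelogs.length ≤ schedules.length
instance (schedules : List Int) (timelogs : List (List Int)) (startday : Int) : Decidable (Pre_solution schedules timelogs startday) := by unfold Pre_solution; infer_instance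

def pvWitness_solution : List Int × List (List Int) × Int :=
  ([900, 905], [[850, 900, 905, 910, 905, 950, 800], [906, 800, 800, 800, 800, 800, 800]], 1)

def Spec_solution (schedules : List Int) (timelogs : List (List Int)) (startday : Int) (out : Int) : Prop := out = solution_alt schedules timelogs startday
instance (schedules : List Int) (timelogs : List (List Int)) (startday : Int) (out : Int) : Decidable (Spec_solution schedules timelogs startday out) := by unfold Spec_solution; infer_instance

-- ===== CLAIM (what is proved, stated in full; the proofs are below) =====
def Claim_equal_solution : Prop := ∀ (schedules : List Int) (timelogs : List (List Int)) (startday : Int), Dom_solution schedules timelogs startday → Pre_solution schedules timelogs startday → Spec_solution schedules timelogs startday (solution schedules timelogs startday)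

-- ===== LEMMAS AND PROOFS =====

-- A's per-employee count of on-time weekday logs, indexed by the running day number
def cnt (allow d : Int) : List Int → Int
  | [] => 0
  | log :: r =>
    (if PySem.Int.mod d 7 ∈ ([1, 2, 3, 4, 5] : List Int) then
       (if log ≤ allow then 1 else 0) else 0) + cnt allow (d + 1) r

lemma foldA_eq (allow : Int) (row : List Int) (d k : Int) :
    row.foldl (stepA allow) (d, k) = (d + row.length, k + cnt allow d row) := by
  induction row generalizing d k with
  | nil => simp [cnt]
  | cons log r ih =>
    simp only [List.foldl_cons, stepA, cnt]
    split_ifs with h1 h2 <;> rw [ih] <;>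
      refine Prod.ext ?_ ?_ <;> simp <;> omega

lemma allow_eq (s : Int) :
    ((if 60 ≤ PySem.Int.mod s 100 + 10 then PySem.Int.floordiv s 100 + 1 else PySem.Int.floordiv s 100) * 100
      + (if 60 ≤ PySem.Int.mod s 100 + 10 then PySem.Int.mod s 100 + 10 - 60 else PySem.Int.mod s 100 + 10))
    = allowOf s := by
  simp only [allowOf]
  have hr0 : 0 ≤ PySem.Int.mod s 100 := PySem.Int.mod_nonneg s (by norm_num)
  have hr1 : PySem.Int.mod s 100 < 100 := PySem.Int.mod_lt s (by norm_num)
  set t := PySem.Int.floordiv s 100 * 60 + PySem.Int.mod s 100 + 10 with ht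
  have hm0 : 0 ≤ PySem.Int.mod t 60 := PySem.Int.mod_nonneg t (by norm_num)
  have hm1 : PySem.Int.mod t 60 < 60 := PySem.Int.mod_lt t (by norm_num)
  have hdm : PySem.Int.floordiv t 60 * 60 + PySem.Int.mod t 60 = t := PySem.Int.floordiv_mul_add_mod t 60
  split_ifs with h <;> omega

lemma outerA_eq (startday a s : Int) (row : List Int) :
    outerA startday a s row = if cnt (allowOf s) startday row = 5 then a + 1 else a := by
  simp only [outerA, foldA_eq, allow_eq, zero_add]

-- cnt as a position-indexed sum
lemma cnt_eq_sum (allow d : Int) (row : List Int) :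
    cnt allow d row
      = ((List.range row.length).map (fun (j : Nat) =>
          if PySem.Int.mod (d + (j : Int)) 7 ∈ ([1, 2, 3, 4, 5] : List Int) ∧ row.getD j 0 ≤ allow
          then (1 : Int) else 0)).sum := by
  induction row generalizing d with
  | nil => simp [cnt]
  | cons log r ih =>
    rw [List.length_cons, List.range_succ_eq_map]
    simp only [List.map_cons, List.map_map, List.sum_cons, cnt]
    have h0 : (if PySem.Int.mod (d + ((0 : Nat) : Int)) 7 ∈ ([1, 2, 3, 4, 5] : List Int) ∧ (log :: r).getD 0 0 ≤ allow
        then (1 : Int) else 0)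
        = (if PySem.Int.mod d 7 ∈ ([1, 2, 3, 4, 5] : List Int) then (if log ≤ allow then (1:Int) else 0) else 0) := by
      simp only [Nat.cast_zero, add_zero, List.getD]
      split_ifs <;> simp_all
    have hmap : (List.range r.length).map
        ((fun (j : Nat) =>
          if PySem.Int.mod (d + (j : Int)) 7 ∈ ([1, 2, 3, 4, 5] : List Int) ∧ (log :: r).getD j 0 ≤ allow
          then (1 : Int) else 0) ∘ Nat.succ)
        = (List.range r.length).map (fun (j : Nat) =>
          if PySem.Int.mod ((d + 1) + (j : Int)) 7 ∈ ([1, 2, 3, 4, 5] : List Int) ∧ r.getD j 0 ≤ allow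
          then (1 : Int) else 0) := by
      apply List.map_congr_left
      intro j hj
      have : d + ((Nat.succ j : Nat) : Int) = (d + 1) + (j : Int) := by push_cast; ring
      simp only [Function.comp, this, Nat.succ_eq_add_one, List.getD_cons_succ]
    rw [h0, hmap, ih]

-- the fold that mutates counts preserves length
lemma foldSet_length (P : Nat → Prop) [DecidablePred P] (is : List Nat) (cs : List Int) :
    (is.foldl (fun cs k => if P k then cs.set k (PySem.List.pyGetD cs (k : Int) 0 + 1) else cs) cs).length
      = cs.length := by
  induction is generalizing cs with
  | nil => rfl
  | cons k rest ih =>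
    rw [List.foldl_cons, ih]
    split_ifs <;> simp

-- one counts[i] += 1 pass over a duplicate-free index list, read back at i
lemma foldSet_getD (P : Nat → Prop) [DecidablePred P] (is : List Nat) (cs : List Int) (i : Nat)
    (hk : ∀ k ∈ is, k < cs.length) (hnd : is.Nodup) :
    (is.foldl (fun cs k => if P k then cs.set k (PySem.List.pyGetD cs (k : Int) 0 + 1) else cs) cs).getD i 0
      = cs.getD i 0 + (if i ∈ is ∧ P i then 1 else 0) := by
  induction is generalizing cs with
  | nil => simp
  | cons k rest ih =>
    rw [List.foldl_cons]
    have hklen : k < cs.length := hk k (by simp)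
    have hrest : ∀ m ∈ rest, m < (if P k then cs.set k (PySem.List.pyGetD cs (k : Int) 0 + 1) else cs).length := by
      intro m hm; split_ifs <;> simp [hk m (by simp [hm])]
    rw [ih _ hrest hnd.of_cons]
    have hknr : k ∉ rest := (List.nodup_cons.mp hnd).1
    have hset : (if P k then cs.set k (PySem.List.pyGetD cs (k : Int) 0 + 1) else cs).getD i 0
        = cs.getD i 0 + (if i = k ∧ P k then 1 else 0) := by
      by_cases h1 : P k
      · rw [if_pos h1, List.getD_eq_getElem?_getD, List.getElem?_set, PySem.List.pyGetD_natCast]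
        by_cases hik : i = k
        · subst hik
          rw [if_pos rfl, if_pos hklen, if_pos ⟨rfl, h1⟩]
          simp [List.getD_eq_getElem?_getD]
        · rw [if_neg (fun h => hik h.symm), if_neg (fun h => hik h.1)]
          simp [List.getD_eq_getElem?_getD]
      · rw [if_neg h1, if_neg (fun h => h1 h.2), add_zero]
    rw [hset]
    by_cases hik : i = k <;> by_cases hir : i ∈ rest <;> by_cases hpi : P i <;>
      subst_eqs <;> simp_all

-- the column fold, read back at employee i
lemma colsFold_getD (timelogs : List (List Int)) (allow : List Int) (startday : Int)
    (cols : List Nat) (cs : List Int) (i : Nat)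
    (hi : i < cs.length) (hlen : cs.length = timelogs.length) :
    (cols.foldl (fun cs (j : Nat) =>
        if PySem.Int.mod (startday + (j : Int)) 7 ∈ ([1, 2, 3, 4, 5] : List Int)
        then colStep timelogs allow j cs else cs) cs).getD i 0
      = cs.getD i 0 + (cols.map (fun (j : Nat) =>
          if PySem.Int.mod (startday + (j : Int)) 7 ∈ ([1, 2, 3, 4, 5] : List Int)
             ∧ ((j : Int) < ((timelogs.getD i []).length : Int)
                ∧ (timelogs.getD i []).getD j 0 ≤ allow.getD i 0)
          then (1 : Int) else 0)).sum := by
  induction cols generalizing cs with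
  | nil => simp
  | cons j rest ih =>
    rw [List.foldl_cons, List.map_cons, List.sum_cons]
    have hstep : ∀ cs' : List Int, cs'.length = cs.length →
        (if PySem.Int.mod (startday + (j : Int)) 7 ∈ ([1, 2, 3, 4, 5] : List Int)
         then colStep timelogs allow j cs' else cs').length = cs.length := by
      intro cs' h; split_ifs with hW
      · rw [colStep, foldSet_length]; exact h
      · exact h
    have hl2 : (if PySem.Int.mod (startday + (j : Int)) 7 ∈ ([1, 2, 3, 4, 5] : List Int)
        then colStep timelogs allow j cs else cs).length = cs.length := hstep cs rfl
    rw [ih _ (by omega) (by omega)]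
    have hone : (if PySem.Int.mod (startday + (j : Int)) 7 ∈ ([1, 2, 3, 4, 5] : List Int)
        then colStep timelogs allow j cs else cs).getD i 0
        = cs.getD i 0 + (if PySem.Int.mod (startday + (j : Int)) 7 ∈ ([1, 2, 3, 4, 5] : List Int)
             ∧ ((j : Int) < ((timelogs.getD i []).length : Int)
                ∧ (timelogs.getD i []).getD j 0 ≤ allow.getD i 0)
          then (1 : Int) else 0) := by
      by_cases hW : PySem.Int.mod (startday + (j : Int)) 7 ∈ ([1, 2, 3, 4, 5] : List Int)
      · rw [if_pos hW, colStep,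
          foldSet_getD _ _ _ _ (fun k hkm => by rw [hlen] at hi ⊢; exact List.mem_range.mp hkm)
            (List.nodup_range)]
        have hmem : i ∈ List.range timelogs.length := List.mem_range.mpr (by omega)
        simp only [PySem.List.pyGetD_natCast, hmem, true_and, hW]
      · rw [if_neg hW, if_neg (fun h => hW h.1), add_zero]
    rw [hone]; ring

-- row lengths are bounded by the maxlen fold
lemma foldl_max_le_foldl_max (l : List (List Int)) {a b : Nat} (h : a ≤ b) :
    l.foldl (fun m row => max m row.length) a ≤ l.foldl (fun m row => max m row.length) b := by
  induction l generalizing a b with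
  | nil => simpa
  | cons x xs ih => exact ih (max_le_max h le_rfl)

lemma foldl_max_start_le (l : List (List Int)) (a : Nat) :
    a ≤ l.foldl (fun m row => max m row.length) a := by
  induction l generalizing a with
  | nil => simp
  | cons x xs ih => exact le_trans (le_max_left a x.length) (ih _)

lemma mem_le_foldl_max (l : List (List Int)) (r : List Int) (hr : r ∈ l) :
    r.length ≤ l.foldl (fun m row => max m row.length) 0 := by
  induction l with
  | nil => simp at hr
  | cons x xs ih =>
    rcases List.mem_cons.mp hr with h | h
    · subst h
      exact le_trans (le_max_right 0 r.length) (foldl_max_start_le xs _)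
    · exact le_trans (ih h) (foldl_max_le_foldl_max xs (Nat.zero_le _))

-- summing the column indicators up to maxlen gives exactly cnt of the row
lemma sum_cols_eq_cnt (startday allow : Int) (row : List Int) (maxlen : Nat)
    (hml : row.length ≤ maxlen) :
    ((List.range maxlen).map (fun (j : Nat) =>
        if PySem.Int.mod (startday + (j : Int)) 7 ∈ ([1, 2, 3, 4, 5] : List Int)
           ∧ ((j : Int) < (row.length : Int) ∧ row.getD j 0 ≤ allow)
        then (1 : Int) else 0)).sum
      = cnt allow startday row := by
  rw [cnt_eq_sum]
  obtain ⟨k, rfl⟩ : ∃ k, maxlen = row.length + k := ⟨maxlen - row.length, by omega⟩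
  rw [List.range_add, List.map_append, List.sum_append, List.map_map]
  have h2 : ((List.range k).map ((fun (j : Nat) =>
      if PySem.Int.mod (startday + (j : Int)) 7 ∈ ([1, 2, 3, 4, 5] : List Int)
         ∧ ((j : Int) < (row.length : Int) ∧ row.getD j 0 ≤ allow)
      then (1 : Int) else 0) ∘ (fun x => row.length + x))).sum = 0 := by
    apply List.sum_eq_zero
    intro x hx
    simp only [List.mem_map, Function.comp] at hx
    obtain ⟨j, -, rfl⟩ := hx
    rw [if_neg]
    rintro ⟨-, hlt, -⟩
    have : ((row.length + j : Nat) : Int) < (row.length : Int) := hlt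
    push_cast at this; omega
  rw [h2, add_zero]
  congr 1
  apply List.map_congr_left
  intro j hj
  have hjl : j < row.length := List.mem_range.mp hj
  have : ((j : Int) < (row.length : Int)) := by exact_mod_cast hjl
  simp [this]

-- the allow list of Source B, read back at i
lemma allow_getD (schedules : List Int) (n i : Nat) (hin : i < n) (hn : n ≤ schedules.length) :
    ((PySem.List.slice schedules none (some (n : Int))).foldl
        (fun acc s => acc ++ [allowOf s]) []).getD i 0
      = allowOf (schedules.getD i 0) := by
  rw [PySem.List.slice_to_natCast, PySem.List.foldl_append_singleton_eq_map, List.nil_append]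
  rw [List.getD_eq_getElem?_getD, List.getElem?_map]
  have hi : i < schedules.length := by omega
  rw [List.getElem?_take_of_lt hin, List.getElem?_eq_getElem hi]
  simp [List.getD_eq_getElem?_getD, List.getElem?_eq_getElem hi]

-- ===== VERDICT (by name: the statement is the Claim_ definition above) =====
theorem solution_spec : Claim_equal_solution := by
  intro schedules timelogs startday _ hpre
  unfold Pre_solution at hpre
  simp only [Spec_solution, solution, solution_alt]
  -- name the pieces of B
  set n := timelogs.length with hn
  set allow := (PySem.List.slice schedules none (some (n : Int))).foldl
    (fun acc s => acc ++ [allowOf s]) [] with hallow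
  set maxlen := timelogs.foldl (fun m r => max m r.length) 0 with hmaxlen
  set counts := (List.range maxlen).foldl (fun cs (j : Nat) =>
    if PySem.Int.mod (startday + (j : Int)) 7 ∈ ([1, 2, 3, 4, 5] : List Int)
    then colStep timelogs allow j cs else cs) (List.replicate n (0 : Int)) with hcounts
  -- counts is exactly the list of per-employee cnt values
  have hclen : counts.length = n := by
    rw [hcounts]
    have : ∀ (cols : List Nat) (cs : List Int),
        (cols.foldl (fun cs (j : Nat) =>
          if PySem.Int.mod (startday + (j : Int)) 7 ∈ ([1, 2, 3, 4, 5] : List Int)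
          then colStep timelogs allow j cs else cs) cs).length = cs.length := by
      intro cols
      induction cols with
      | nil => intro cs; rfl
      | cons j rest ih =>
        intro cs
        rw [List.foldl_cons, ih]
        split_ifs with hW
        · rw [colStep, foldSet_length]
        · rfl
    rw [this]; simp
  have hceq : counts = (List.range n).map (fun (i : Nat) =>
      cnt (allowOf (schedules.getD i 0)) startday (timelogs.getD i [])) := by
    apply List.ext_getElem
    · simp [hclen]
    · intro i h1 h2
      have hin : i < n := by simpa [hclen] using h1
      have hrow_mem : timelogs.getD i [] ∈ timelogs := by
        rw [List.getD_eq_getElem?_getD, List.getElem?_eq_getElem hin]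
        exact List.getElem_mem _
      have hml : (timelogs.getD i []).length ≤ maxlen := mem_le_foldl_max _ _ hrow_mem
      have hg : counts[i] = counts.getD i 0 := by
        rw [List.getD_eq_getElem?_getD, List.getElem?_eq_getElem h1]
        rfl
      rw [hg, hcounts, colsFold_getD timelogs allow startday _ _ i (by simp [hin]) (by simpa using hn)]
      rw [allow_getD schedules n i hin hpre]
      rw [sum_cols_eq_cnt startday _ _ maxlen hml]
      simp [hin]
  rw [hceq, List.foldl_map]
  -- the A side is the same fold over range n
  apply PySem.List.foldl_congr_mem
  intro acc i hi
  have hin : i < n := List.mem_range.mp hi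
  rw [outerA_eq, PySem.List.pyGetD_natCast, PySem.List.pyGetD_natCast]
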